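-- pv_equiv track=rewrite | github.com/Jeff-Kwan/COMP5331_CMSR_Implementation | data/UnisRec_data_process.py | convert_inters2dict
-- ===== SOURCE A (Python) =====
-- import collections
--
-- def convert_inters2dict(inters):
--     user2items = collections.defaultdict(list)
--     user2index, item2index = dict(), dict()
--     for inter in inters:
--         user, item, rating, timestamp = inter
--         if user not in user2index:
--             user2index[user] = len(user2index)
--         if item not in item2index:
--             item2index[item] = len(item2index)
--         user2items[user2index[user]].append(item2index[item])
--     return user2items, user2index, item2index
-- ===== SOURCE B (Python) =====
-- import collections
--
-- def convert_inters2dict(inters):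
--     users = [t[0] for t in inters]
--     items = [t[1] for t in inters]
--     user2index = {u: i for i, u in enumerate(dict.fromkeys(users))}
--     item2index = {it: i for i, it in enumerate(dict.fromkeys(items))}
--     user2items = collections.defaultdict(list)
--     for user, item, rating, timestamp in inters:
--         user2items[user2index[user]].append(item2index[item])
--     return user2items, user2index, item2index
-- ===== Notes on version B (the rewrite author's own statement) =====
-- stated objective: alternative
-- what changed: Replaces A's single fused loop (three dicts updated per iteration) by a two-phase decomposition: the index maps are built declaratively by enumerating dict.fromkeys of the user/item columns, and a second pass groups item indices per user index.
import Mathlib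
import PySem

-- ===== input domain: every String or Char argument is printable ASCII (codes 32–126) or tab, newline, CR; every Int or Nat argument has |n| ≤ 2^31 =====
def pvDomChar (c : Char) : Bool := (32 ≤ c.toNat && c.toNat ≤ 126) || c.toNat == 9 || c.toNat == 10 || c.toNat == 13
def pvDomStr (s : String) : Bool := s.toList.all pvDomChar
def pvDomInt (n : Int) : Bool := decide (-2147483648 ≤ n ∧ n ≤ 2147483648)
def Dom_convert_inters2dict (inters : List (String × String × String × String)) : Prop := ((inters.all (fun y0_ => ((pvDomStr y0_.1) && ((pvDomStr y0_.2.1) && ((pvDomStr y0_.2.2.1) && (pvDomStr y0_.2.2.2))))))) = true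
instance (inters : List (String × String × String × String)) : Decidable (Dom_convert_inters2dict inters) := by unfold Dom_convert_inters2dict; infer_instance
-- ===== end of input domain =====

-- B rebuilds the two first-appearance index maps declaratively (enumerate of dict.fromkeys of each
-- column) and fills user2items in a separate second pass, instead of A's single fused loop; same
-- cost, a different decomposition ("alternative").

-- ===== PORT A =====
-- one fold over inters carrying (user2items, user2index, item2index); defaultdict append = Dict.modify _ [] (· ++ [·])
def convert_inters2dict (inters : List (String × String × String × String)) :
    (List (Int × List Int)) × (List (String × Int)) × (List (String × Int)) :=
  let st := inters.foldl
    (fun st inter =>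
      let user := inter.1
      let item := inter.2.1
      let u2i := if st.2.1.contains user then st.2.1 else st.2.1.insert user (st.2.1.size : Int)
      let i2i := if st.2.2.contains item then st.2.2 else st.2.2.insert item (st.2.2.size : Int)
      (st.1.modify (u2i.getD user 0) [] (fun l => l ++ [i2i.getD item 0]), u2i, i2i))
    ((PySem.Dict.empty : PySem.Dict Int (List Int)),
     (PySem.Dict.empty : PySem.Dict String Int),
     (PySem.Dict.empty : PySem.Dict String Int))
  (st.1.items, st.2.1.items, st.2.2.items)

-- ===== PORT B =====
-- dict comprehension {k: i for i, k in enumerate(dict.fromkeys(col))} = foldl insert over the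
-- swapped enumeration of PySem.List.dedup; then a second pass fills user2items
def convert_inters2dict_alt (inters : List (String × String × String × String)) :
    (List (Int × List Int)) × (List (String × Int)) × (List (String × Int)) :=
  let users := inters.map (fun t => t.1)
  let itemsL := inters.map (fun t => t.2.1)
  let user2index : PySem.Dict String Int :=
    ((PySem.List.enumerate (PySem.List.dedup users) 0).map (fun p => (p.2, p.1))).foldl
      (fun d p => d.insert p.1 p.2) PySem.Dict.empty
  let item2index : PySem.Dict String Int :=
    ((PySem.List.enumerate (PySem.List.dedup itemsL) 0).map (fun p => (p.2, p.1))).foldl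
      (fun d p => d.insert p.1 p.2) PySem.Dict.empty
  let user2items := inters.foldl
    (fun d t => d.modify (user2index.getD t.1 0) [] (fun l => l ++ [item2index.getD t.2.1 0]))
    (PySem.Dict.empty : PySem.Dict Int (List Int))
  (user2items.items, user2index.items, item2index.items)

-- ===== PRECONDITION & SPEC =====
def Spec_convert_inters2dict (inters : List (String × String × String × String)) (out : (List (Int × List Int)) × (List (String × Int)) × (List (String × Int))) : Prop := out = convert_inters2dict_alt inters
instance (inters : List (String × String × String × String)) (out : (List (Int × List Int)) × (List (String × Int)) × (List (String × Int))) : Decidable (Spec_convert_inters2dict inters out) := by unfold Spec_convert_inters2dict; infer_instance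

-- ===== CLAIM (what is proved, stated in full; the proofs are below) =====
def Claim_equal_convert_inters2dict : Prop := ∀ (inters : List (String × String × String × String)), Dom_convert_inters2dict inters → Spec_convert_inters2dict inters (convert_inters2dict inters)

-- ===== LEMMAS AND PROOFS =====

-- A's loop body (proof helper; the port writes it inline)
def pvStepA (st : PySem.Dict Int (List Int) × PySem.Dict String Int × PySem.Dict String Int)
    (inter : String × String × String × String) :
    PySem.Dict Int (List Int) × PySem.Dict String Int × PySem.Dict String Int :=
  let u2i := if st.2.1.contains inter.1 then st.2.1 else st.2.1.insert inter.1 (st.2.1.size : Int)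
  let i2i := if st.2.2.contains inter.2.1 then st.2.2 else st.2.2.insert inter.2.1 (st.2.2.size : Int)
  (st.1.modify (u2i.getD inter.1 0) [] (fun l => l ++ [i2i.getD inter.2.1 0]), u2i, i2i)

-- the index-map part of A's loop, on the two string dicts alone
def pvStepP (st : PySem.Dict String Int × PySem.Dict String Int)
    (inter : String × String × String × String) :
    PySem.Dict String Int × PySem.Dict String Int :=
  (if st.1.contains inter.1 then st.1 else st.1.insert inter.1 (st.1.size : Int),
   if st.2.contains inter.2.1 then st.2 else st.2.insert inter.2.1 (st.2.size : Int))

-- first-appearance indexing of a single column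
def pvIdxStep (d : PySem.Dict String Int) (u : String) : PySem.Dict String Int :=
  if d.contains u then d else d.insert u (d.size : Int)

lemma pvFoldA_eq (inters : List (String × String × String × String)) :
    convert_inters2dict inters =
      ((inters.foldl pvStepA (PySem.Dict.empty, PySem.Dict.empty, PySem.Dict.empty)).1.items,
       (inters.foldl pvStepA (PySem.Dict.empty, PySem.Dict.empty, PySem.Dict.empty)).2.1.items,
       (inters.foldl pvStepA (PySem.Dict.empty, PySem.Dict.empty, PySem.Dict.empty)).2.2.items) := rfl

lemma pvProjP (inters : List (String × String × String × String))
    (st : PySem.Dict Int (List Int) × PySem.Dict String Int × PySem.Dict String Int) :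
    (inters.foldl pvStepA st).2 = inters.foldl pvStepP st.2 := by
  induction inters generalizing st with
  | nil => rfl
  | cons x rest ih => exact ih (pvStepA st x)

lemma pvProjP1 (inters : List (String × String × String × String))
    (st : PySem.Dict String Int × PySem.Dict String Int) :
    (inters.foldl pvStepP st).1 = (inters.map (fun t => t.1)).foldl pvIdxStep st.1 := by
  induction inters generalizing st with
  | nil => rfl
  | cons x rest ih => exact ih (pvStepP st x)

lemma pvProjP2 (inters : List (String × String × String × String))
    (st : PySem.Dict String Int × PySem.Dict String Int) :
    (inters.foldl pvStepP st).2 = (inters.map (fun t => t.2.1)).foldl pvIdxStep st.2 := by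
  induction inters generalizing st with
  | nil => rfl
  | cons x rest ih => exact ih (pvStepP st x)

-- values once present never change under the indexing fold
lemma pvIdxMono (xs : List String) (d : PySem.Dict String Int) (k : String) (v : Int)
    (h : d.get? k = some v) : (xs.foldl pvIdxStep d).get? k = some v := by
  induction xs generalizing d with
  | nil => exact h
  | cons x rest ih =>
      apply ih
      unfold pvIdxStep
      split
      · exact h
      · rcases eq_or_ne k x with rfl | hne
        · rename_i hc
          rw [PySem.Dict.contains_eq_isSome_get?, h] at hc
          simp at hc
        · rw [PySem.Dict.get?_insert_of_ne _ _ hne]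
          exact h
  -- (rename_i names the contains-hypothesis of the split)

lemma pvMonoP1 (inters : List (String × String × String × String))
    (st : PySem.Dict String Int × PySem.Dict String Int) (k : String) (v : Int)
    (h : st.1.get? k = some v) : (inters.foldl pvStepP st).1.get? k = some v := by
  rw [pvProjP1]; exact pvIdxMono _ _ _ _ h

lemma pvMonoP2 (inters : List (String × String × String × String))
    (st : PySem.Dict String Int × PySem.Dict String Int) (k : String) (v : Int)
    (h : st.2.get? k = some v) : (inters.foldl pvStepP st).2.get? k = some v := by
  rw [pvProjP2]; exact pvIdxMono _ _ _ _ h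

lemma pvStepPresent (d : PySem.Dict String Int) (u : String) :
    ∃ v, (pvIdxStep d u).get? u = some v := by
  unfold pvIdxStep
  split
  · rename_i hc
    rw [PySem.Dict.contains_eq_isSome_get?] at hc
    exact Option.isSome_iff_exists.mp hc
  · exact ⟨_, PySem.Dict.get?_insert_self _ _ _⟩

-- A's user2items equals a second pass that looks indices up in the FINAL maps
lemma pvU2It (inters : List (String × String × String × String))
    (d0 : PySem.Dict Int (List Int)) (st : PySem.Dict String Int × PySem.Dict String Int) :
    (inters.foldl pvStepA (d0, st)).1 =
      inters.foldl
        (fun d t => d.modify ((inters.foldl pvStepP st).1.getD t.1 0) []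
          (fun l => l ++ [((inters.foldl pvStepP st).2.getD t.2.1 0)])) d0 := by
  induction inters generalizing d0 st with
  | nil => rfl
  | cons x rest ih =>
      simp only [List.foldl_cons]
      have hA : pvStepA (d0, st) x =
          ((d0.modify ((pvStepP st x).1.getD x.1 0) []
            (fun l => l ++ [((pvStepP st x).2.getD x.2.1 0)])), pvStepP st x) := rfl
      rw [hA, ih]
      -- replace the prefix-state lookups by final-map lookups
      obtain ⟨v1, hv1⟩ := pvStepPresent st.1 x.1
      obtain ⟨v2, hv2⟩ := pvStepPresent st.2 x.2.1
      have hv1' : (pvStepP st x).1.get? x.1 = some v1 := hv1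
      have hv2' : (pvStepP st x).2.get? x.2.1 = some v2 := hv2
      have h1 : (rest.foldl pvStepP (pvStepP st x)).1.getD x.1 0 = (pvStepP st x).1.getD x.1 0 := by
        rw [PySem.Dict.getD_eq_get?_getD, PySem.Dict.getD_eq_get?_getD,
          pvMonoP1 rest (pvStepP st x) x.1 v1 hv1', hv1']
      have h2 : (rest.foldl pvStepP (pvStepP st x)).2.getD x.2.1 0 = (pvStepP st x).2.getD x.2.1 0 := by
        rw [PySem.Dict.getD_eq_get?_getD, PySem.Dict.getD_eq_get?_getD,
          pvMonoP2 rest (pvStepP st x) x.2.1 v2 hv2', hv2']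
      rw [h1, h2]

-- keys of the comprehension dict built from the swapped enumeration of a nodup list
lemma pvCompKeys (E : List String) (hE : E.Nodup) :
    (((PySem.List.enumerate E 0).map (fun p => (p.2, p.1))).foldl
        (fun d p => d.insert p.1 p.2) (PySem.Dict.empty : PySem.Dict String Int)).keys = E := by
  rw [PySem.Dict.keys_foldl_insert_key]
  simp only [PySem.Dict.keys_empty, List.map_map, PySem.Set.update_nil_left]
  have hm : (List.map (Prod.fst ∘ fun p : Int × String => (p.2, p.1)) (PySem.List.enumerate E)) = E := by
    rw [show (Prod.fst ∘ fun p : Int × String => (p.2, p.1)) = (fun p : Int × String => p.2) from rfl]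
    simp [PySem.List.map_snd_enumerate]
  rw [hm]
  exact PySem.Set.ofList_eq_self_of_nodup _ hE

lemma pvSizeKeys (d : PySem.Dict String Int) : d.size = d.keys.length := by
  simp [PySem.Dict.size, PySem.Dict.keys]

-- the first-appearance indexing fold IS the comprehension over enumerate(dedup(xs))
lemma pvIdxFold_eq (xs : List String) :
    xs.foldl pvIdxStep PySem.Dict.empty =
      ((PySem.List.enumerate (PySem.List.dedup xs) 0).map (fun p => (p.2, p.1))).foldl
        (fun d p => d.insert p.1 p.2) PySem.Dict.empty := by
  induction xs using List.reverseRecOn with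
  | nil => rfl
  | append_singleton xs x ih =>
      rw [List.foldl_append, ih]
      set C := ((PySem.List.enumerate (PySem.List.dedup xs) 0).map (fun p => (p.2, p.1))).foldl
        (fun d p => d.insert p.1 p.2) (PySem.Dict.empty : PySem.Dict String Int) with hC
      have hE : (PySem.List.dedup xs).Nodup := PySem.List.nodup_dedup xs
      have hkeys : C.keys = PySem.List.dedup xs := pvCompKeys _ hE
      have hded : PySem.List.dedup (xs ++ [x]) = PySem.Set.add (PySem.List.dedup xs) x := by
        simp only [PySem.List.dedup_eq_ofList]
        exact PySem.Set.ofList_append_singleton xs x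
      by_cases hx : x ∈ xs
      · have hxd : x ∈ PySem.List.dedup xs := by rw [PySem.List.mem_dedup]; exact hx
        have hc : C.contains x = true := by
          rw [PySem.Dict.contains_eq_decide_mem_keys, hkeys]; simp [hx]
        have hstep : List.foldl pvIdxStep C [x] = C := by
          simp only [List.foldl_cons, List.foldl_nil, pvIdxStep, hc]; simp
        rw [hstep, hded, PySem.Set.add_of_mem hxd]
      · have hxd : x ∉ PySem.List.dedup xs := by rw [PySem.List.mem_dedup]; exact hx
        have hc : C.contains x = false := by
          rw [PySem.Dict.contains_eq_decide_mem_keys, hkeys]; simp [hx]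
        have hsize : (C.size : Int) = ((PySem.List.dedup xs).length : Int) := by
          rw [pvSizeKeys, hkeys]
        have hstep : List.foldl pvIdxStep C [x] = C.insert x ((PySem.List.dedup xs).length : Int) := by
          simp only [List.foldl_cons, List.foldl_nil, pvIdxStep, hc]
          rw [← hsize]; simp
        rw [hstep, hded, PySem.Set.add_of_not_mem hxd, PySem.List.enumerate_append, List.map_append,
          List.foldl_append, ← hC]
        simp [PySem.List.enumerate_cons]

-- ===== VERDICT (by name: the statement is the Claim_ definition above) =====
theorem convert_inters2dict_spec : Claim_equal_convert_inters2dict := by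
  intro inters _
  unfold Spec_convert_inters2dict convert_inters2dict_alt
  rw [pvFoldA_eq]
  have hP := pvProjP inters (PySem.Dict.empty, PySem.Dict.empty, PySem.Dict.empty)
  have h1 : (inters.foldl pvStepP (PySem.Dict.empty, PySem.Dict.empty)).1 =
      ((PySem.List.enumerate (PySem.List.dedup (inters.map (fun t => t.1))) 0).map
        (fun p => (p.2, p.1))).foldl (fun d p => d.insert p.1 p.2) PySem.Dict.empty := by
    rw [pvProjP1, pvIdxFold_eq]
  have h2 : (inters.foldl pvStepP (PySem.Dict.empty, PySem.Dict.empty)).2 =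
      ((PySem.List.enumerate (PySem.List.dedup (inters.map (fun t => t.2.1))) 0).map
        (fun p => (p.2, p.1))).foldl (fun d p => d.insert p.1 p.2) PySem.Dict.empty := by
    rw [pvProjP2, pvIdxFold_eq]
  have hU := pvU2It inters PySem.Dict.empty (PySem.Dict.empty, PySem.Dict.empty)
  simp only [hP] at hU ⊢
  rw [hU, h1, h2]
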